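-- pv_equiv track=rewrite | github.com/Zubes01/LiDAR_Student_Detection | convolutional_nn.py | downsample_to_given_times
-- ===== SOURCE A (Python) =====
-- def downsample_to_given_times(times, data, new_times):
--     """
--     This function takes a list of times and a list of data and returns a new list of data that is downsampled to the given new_times
--     """
--     new_data = []
--     for i in range(len(new_times)):
--         j = 0
--         while j < len(data) - 1 and times[j] < new_times[i]:
--             j += 1
--         new_data.append(data[j])
--     return new_data
-- ===== SOURCE B (Python) =====
-- def downsample_to_given_times(times, data, new_times):
--     """
--     This function takes a list of times and a list of data and returns a new list of data that is downsampled to the given new_times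
--     """
--     m = len(data) - 1
--     # staircase of strict prefix maxima of times[:m], with the data value at each step
--     vals = []
--     outs = []
--     for v, d in zip(times[:m], data):
--         if not vals or vals[-1] < v:
--             vals.append(v)
--             outs.append(d)
--     new_data = []
--     for t in new_times:
--         # binary search: first k with vals[k] >= t
--         lo, hi = 0, len(vals)
--         while lo < hi:
--             mid = (lo + hi) // 2
--             if vals[mid] < t:
--                 lo = mid + 1
--             else:
--                 hi = mid
--         new_data.append(outs[lo] if lo < len(vals) else data[m])
--     return new_data
-- ===== Notes on version B (the rewrite author's own statement) =====
-- stated objective: faster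
-- what changed: Per query, A rescans times from index 0; B precomputes the staircase of strict prefix maxima of times[:len(data)-1] (paired with their data values) once and answers each query by binary search on that strictly increasing staircase.
import Mathlib
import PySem

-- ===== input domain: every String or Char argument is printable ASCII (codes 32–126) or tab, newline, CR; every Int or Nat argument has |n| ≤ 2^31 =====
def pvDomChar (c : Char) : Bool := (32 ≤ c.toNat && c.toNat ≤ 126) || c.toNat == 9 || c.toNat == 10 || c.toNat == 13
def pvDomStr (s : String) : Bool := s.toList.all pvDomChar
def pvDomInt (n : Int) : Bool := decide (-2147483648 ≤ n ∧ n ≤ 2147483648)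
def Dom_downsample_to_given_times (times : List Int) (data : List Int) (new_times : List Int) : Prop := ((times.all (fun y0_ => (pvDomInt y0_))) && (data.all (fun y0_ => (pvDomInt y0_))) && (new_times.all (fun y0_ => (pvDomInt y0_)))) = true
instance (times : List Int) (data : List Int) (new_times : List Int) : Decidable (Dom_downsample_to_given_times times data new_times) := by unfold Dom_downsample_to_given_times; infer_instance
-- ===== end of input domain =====

-- B precomputes the staircase of strict prefix maxima of times[:len(data)-1] once and
-- answers each query by binary search on it, instead of A's per-query linear rescan.

-- ===== PORT A =====
-- the inner `while j < len(data) - 1 and times[j] < new_times[i]: j += 1` (fuel = len(data) - 1 bounds the loop)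
def pvScanA (times : List Int) (dlen1 : Nat) (t : Int) : Nat → Nat → Nat
  | 0, j => j
  | fuel+1, j =>
    if j < dlen1 ∧ ((PySem.List.pyGet? times (j : Int)).getD 0) < t then
      pvScanA times dlen1 t fuel (j+1)
    else j

def downsample_to_given_times (times : List Int) (data : List Int) (new_times : List Int) : List Int :=
  new_times.foldl (fun new_data t =>
    let j := pvScanA times (data.length - 1) t (data.length - 1) 0
    new_data ++ [(PySem.List.pyGet? data (j : Int)).getD 0]) []

-- ===== PORT B =====
-- `not vals or vals[-1] < v`
def pvLastLt (vs : List Int) (v : Int) : Bool :=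
  match PySem.List.pyGet? vs (-1) with
  | none => true
  | some w => decide (w < v)

-- one iteration of B's staircase-building loop over zip(times[:m], data)
def pvStep (p : List Int × List Int) (vd : Int × Int) : List Int × List Int :=
  if pvLastLt p.1 vd.1 then (p.1 ++ [vd.1], p.2 ++ [vd.2]) else p

-- B's hand-written binary-search loop (first k with vals[k] >= t); fuel = len(vals) bounds it
def pvBisect (vals : List Int) (t : Int) : Nat → Nat → Nat → Nat
  | 0, lo, _hi => lo
  | fuel+1, lo, hi =>
    if lo < hi then
      let mid := (lo + hi) / 2
      if ((PySem.List.pyGet? vals (mid : Int)).getD 0) < t then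
        pvBisect vals t fuel (mid+1) hi
      else
        pvBisect vals t fuel lo mid
    else lo

def downsample_to_given_times_alt (times : List Int) (data : List Int) (new_times : List Int) : List Int :=
  let m : Int := (data.length : Int) - 1
  let st := ((PySem.List.slice times none (some m)).zip data).foldl pvStep ([], [])
  new_times.foldl (fun new_data t =>
    let lo := pvBisect st.1 t st.1.length 0 st.1.length
    new_data ++ [if lo < st.1.length then (PySem.List.pyGet? st.2 (lo : Int)).getD 0
                 else (PySem.List.pyGet? data m).getD 0]) []

-- ===== PRECONDITION & SPEC =====
-- Pre_ excludes exactly the inputs where A raises IndexError: data empty with a query present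
-- (data[j] out of range), or times shorter than len(data)-1 while some query exceeds every
-- entry of times (the scan runs past the end of times).
def Pre_downsample_to_given_times (times : List Int) (data : List Int) (new_times : List Int) : Prop :=
  (data ≠ [] ∨ new_times = []) ∧
  (data.length ≤ times.length + 1 ∨ ∀ t ∈ new_times, ∃ x ∈ times, t ≤ x)
instance (times : List Int) (data : List Int) (new_times : List Int) : Decidable (Pre_downsample_to_given_times times data new_times) := by unfold Pre_downsample_to_given_times; infer_instance

def pvWitness_downsample_to_given_times : List Int × List Int × List Int := ([0, 2, 4], [10, 20, 30], [3, -1, 9])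

def Spec_downsample_to_given_times (times : List Int) (data : List Int) (new_times : List Int) (out : List Int) : Prop := out = downsample_to_given_times_alt times data new_times
instance (times : List Int) (data : List Int) (new_times : List Int) (out : List Int) : Decidable (Spec_downsample_to_given_times times data new_times out) := by unfold Spec_downsample_to_given_times; infer_instance

-- ===== CLAIM (what is proved, stated in full; the proofs are below) =====
def Claim_equal_downsample_to_given_times : Prop := ∀ (times : List Int) (data : List Int) (new_times : List Int), Dom_downsample_to_given_times times data new_times → Pre_downsample_to_given_times times data new_times → Spec_downsample_to_given_times times data new_times (downsample_to_given_times times data new_times)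

-- ===== LEMMAS AND PROOFS =====

-- proof-side recursive description of B's staircase (cur = last value kept so far)
def pvNewMax (cur : Option Int) (v : Int) : Bool :=
  match cur with
  | none => true
  | some w => decide (w < v)

def pvStair : List (Int × Int) → Option Int → List (Int × Int)
  | [], _ => []
  | (v, d) :: rest, cur =>
    if pvNewMax cur v then (v, d) :: pvStair rest (some v) else pvStair rest cur

theorem pvGet_neg_one (vs : List Int) : PySem.List.pyGet? vs (-1) = vs.getLast? := by
  cases vs using List.reverseRecOn with
  | nil => simp [PySem.List.pyGet?]
  | append_singleton xs x => simp [PySem.List.pyGet?_neg_one]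

theorem pvLastLt_eq (vs : List Int) (v : Int) : pvLastLt vs v = pvNewMax vs.getLast? v := by
  unfold pvLastLt pvNewMax
  rw [pvGet_neg_one]

-- B's fold equals the staircase appended to the accumulator
theorem pvFold_eq_stair (Q : List (Int × Int)) (vs os : List Int) :
    Q.foldl pvStep (vs, os) =
      (vs ++ (pvStair Q vs.getLast?).map Prod.fst, os ++ (pvStair Q vs.getLast?).map Prod.snd) := by
  induction Q generalizing vs os with
  | nil => simp [pvStair]
  | cons vd rest ih =>
    obtain ⟨v, d⟩ := vd
    rw [List.foldl_cons]
    have hstep : pvStep (vs, os) (v, d) =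
        if pvNewMax vs.getLast? v then (vs ++ [v], os ++ [d]) else (vs, os) := by
      simp [pvStep, pvLastLt_eq]
    by_cases h : pvNewMax vs.getLast? v = true
    · rw [hstep, if_pos h, ih (vs ++ [v]) (os ++ [d])]
      simp [pvStair, h]
    · rw [hstep, if_neg h, ih vs os]
      simp [pvStair, h]

-- staircase values are strictly increasing and above cur
theorem pvStair_chain (Q : List (Int × Int)) (cur : Option Int) :
    ((pvStair Q cur).map Prod.fst).Pairwise (· < ·) ∧
      (∀ w, cur = some w → ∀ v ∈ (pvStair Q cur).map Prod.fst, w < v) := by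
  induction Q generalizing cur with
  | nil => simp [pvStair]
  | cons vd rest ih =>
    obtain ⟨v, d⟩ := vd
    by_cases h : pvNewMax cur v = true
    · have ihv := ih (some v)
      constructor
      · simp only [pvStair, h, if_pos, List.map_cons, List.pairwise_cons]
        exact ⟨fun x hx => ihv.2 v rfl x hx, ihv.1⟩
      · intro w hw x hx
        simp only [pvStair, h, if_pos, List.map_cons, List.mem_cons] at hx
        have hwv : w < v := by
          subst hw; simpa [pvNewMax] using h
        rcases hx with rfl | hx
        · exact hwv
        · exact lt_trans hwv (ihv.2 v rfl x hx)
    · simp only [pvStair, h, Bool.false_eq_true, reduceIte]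
      exact ih cur

-- first staircase element ≥ t is the first list element ≥ t
theorem pvStair_find (Q : List (Int × Int)) (cur : Option Int) (t : Int)
    (hcur : ∀ w, cur = some w → w < t) :
    (pvStair Q cur).find? (fun p => decide (t ≤ p.1)) = Q.find? (fun p => decide (t ≤ p.1)) := by
  induction Q generalizing cur with
  | nil => simp [pvStair]
  | cons vd rest ih =>
    obtain ⟨v, d⟩ := vd
    by_cases h : pvNewMax cur v = true
    · simp only [pvStair, h, if_pos]
      by_cases htv : t ≤ v
      · simp [htv]
      · simp only [List.find?_cons, htv, decide_false]
        exact ih (some v) (by intro w hw; cases hw; omega)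
    · have hv : ∃ w, cur = some w ∧ ¬ w < v := by
        unfold pvNewMax at h
        cases cur with
        | none => simp at h
        | some w => exact ⟨w, rfl, by simpa using h⟩
      obtain ⟨w, rfl, hwv⟩ := hv
      have hvt : ¬ t ≤ v := by have := hcur w rfl; omega
      simp only [pvStair, h, Bool.false_eq_true, reduceIte, List.find?_cons, hvt, decide_false]
      exact ih (some w) hcur

theorem pvBisect_zero (vals : List Int) (t : Int) (lo hi : Nat) :
    pvBisect vals t 0 lo hi = lo := rfl

theorem pvBisect_succ (vals : List Int) (t : Int) (fuel lo hi : Nat) :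
    pvBisect vals t (fuel + 1) lo hi =
      if lo < hi then
        (if ((PySem.List.pyGet? vals (((lo + hi) / 2 : Nat) : Int)).getD 0) < t then
          pvBisect vals t fuel ((lo + hi) / 2 + 1) hi
        else pvBisect vals t fuel lo ((lo + hi) / 2))
      else lo := rfl

-- binary-search characterisation
theorem pvBisect_char (vals : List Int) (t : Int)
    (hs : vals.Pairwise (· ≤ ·)) :
    ∀ fuel lo hi, lo ≤ hi → hi ≤ vals.length → hi - lo ≤ fuel →
    (∀ i (h : i < vals.length), i < lo → vals[i] < t) →
    (∀ i (h : i < vals.length), hi ≤ i → t ≤ vals[i]) →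
    pvBisect vals t fuel lo hi ≤ vals.length ∧
      (∀ i (h : i < vals.length), i < pvBisect vals t fuel lo hi → vals[i] < t) ∧
      (∀ h : pvBisect vals t fuel lo hi < vals.length, t ≤ vals[pvBisect vals t fuel lo hi]) := by
  have hmono : ∀ i j (hi : i < vals.length) (hj : j < vals.length), i ≤ j → vals[i] ≤ vals[j] := by
    intro i j hi hj hij
    rcases Nat.lt_or_ge i j with h | h
    · exact (List.pairwise_iff_getElem.mp hs) i j hi hj h
    · have : i = j := by omega
      subst this; rfl
  intro fuel
  induction fuel with
  | zero =>
    intro lo hi h1 h2 h3 hlo hhi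
    have he : lo = hi := by omega
    subst he
    rw [pvBisect_zero]
    exact ⟨by omega, hlo, fun h => hhi _ h (le_refl _)⟩
  | succ fuel ih =>
    intro lo hi h1 h2 h3 hlo hhi
    by_cases hlh : lo < hi
    · have hmidlt : (lo + hi) / 2 < hi := by omega
      have hmidge : lo ≤ (lo + hi) / 2 := by omega
      have hmlen : (lo + hi) / 2 < vals.length := by omega
      have hprobe : ((PySem.List.pyGet? vals (((lo + hi) / 2 : Nat) : Int)).getD 0) = vals[(lo + hi) / 2] := by
        rw [PySem.List.pyGet?_natCast, List.getElem?_eq_getElem hmlen]; rfl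
      rw [pvBisect_succ, if_pos hlh, hprobe]
      by_cases hv : vals[(lo + hi) / 2] < t
      · rw [if_pos hv]
        refine ih ((lo + hi) / 2 + 1) hi (by omega) h2 (by omega) ?_ hhi
        intro i h hil
        calc vals[i] ≤ vals[(lo + hi) / 2] := hmono i _ h hmlen (by omega)
          _ < t := hv
      · rw [if_neg hv]
        refine ih lo ((lo + hi) / 2) (by omega) (by omega) (by omega) hlo ?_
        intro i h hmi
        calc t ≤ vals[(lo + hi) / 2] := by omega
          _ ≤ vals[i] := hmono _ i hmlen h hmi
    · have he : lo = hi := by omega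
      subst he
      rw [pvBisect_succ, if_neg hlh]
      exact ⟨by omega, hlo, fun h => hhi _ h (le_refl _)⟩

theorem pvBisect_eq_findIdx (vals : List Int) (t : Int) (hs : vals.Pairwise (· ≤ ·)) :
    pvBisect vals t vals.length 0 vals.length = vals.findIdx (fun x => decide (t ≤ x)) := by
  obtain ⟨hle, hlt, hge⟩ := pvBisect_char vals t hs vals.length 0 vals.length
    (by omega) (le_refl _) (by omega) (by omega) (by intro i h hli; omega)
  set r := pvBisect vals t vals.length 0 vals.length with hr
  set f := vals.findIdx (fun x => decide (t ≤ x)) with hf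
  have hfle : f ≤ vals.length := List.findIdx_le_length
  rcases Nat.lt_trichotomy r f with h | h | h
  · -- r < f : then r < length and ¬ t ≤ vals[r], contradicting hge
    have hrlen : r < vals.length := by omega
    have := List.not_of_lt_findIdx (p := fun x => decide (t ≤ x)) (xs := vals) h
    simp only [decide_eq_false_iff_not] at this
    exact absurd (hge hrlen) this
  · exact h
  · -- f < r : then f < length, t ≤ vals[f], contradicting hlt
    have hflen : f < vals.length := by omega
    have hpf : t ≤ vals[f] := by
      have := List.findIdx_getElem (p := fun x => decide (t ≤ x)) (xs := vals) (w := hflen)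
      simpa using this
    have := hlt f hflen h
    omega

theorem pvScanA_zero (times : List Int) (dlen1 : Nat) (t : Int) (j : Nat) :
    pvScanA times dlen1 t 0 j = j := rfl

theorem pvScanA_succ (times : List Int) (dlen1 : Nat) (t : Int) (fuel j : Nat) :
    pvScanA times dlen1 t (fuel + 1) j =
      if j < dlen1 ∧ ((PySem.List.pyGet? times (j : Int)).getD 0) < t then
        pvScanA times dlen1 t fuel (j + 1)
      else j := rfl

-- A's scan equals findIdx over times[:dlen1] (under the safety hypothesis from Pre_)
theorem pvScanA_eq (times : List Int) (dlen1 : Nat) (t : Int) :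
    ∀ fuel j, dlen1 ≤ j + fuel →
    (dlen1 ≤ times.length ∨ ∃ x ∈ times.drop j, t ≤ x) →
    pvScanA times dlen1 t fuel j =
      j + ((times.drop j).take (dlen1 - j)).findIdx (fun x => decide (t ≤ x)) := by
  intro fuel
  induction fuel with
  | zero =>
    intro j hj hsafe
    have : dlen1 - j = 0 := by omega
    simp [pvScanA_zero, this]
  | succ fuel ih =>
    intro j hj hsafe
    by_cases hjd : j < dlen1
    · have hjt : j < times.length := by
        rcases hsafe with h | ⟨x, hx, htx⟩
        · omega
        · by_contra hc
          rw [List.drop_eq_nil_of_le (by omega)] at hx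
          exact absurd hx (List.not_mem_nil)
      have hprobe : ((PySem.List.pyGet? times ((j : Nat) : Int)).getD 0) = times[j] := by
        rw [PySem.List.pyGet?_natCast, List.getElem?_eq_getElem hjt]; rfl
      have hdrop : times.drop j = times[j] :: times.drop (j + 1) :=
        List.drop_eq_getElem_cons hjt
      have htake : dlen1 - j = (dlen1 - (j + 1)) + 1 := by omega
      rw [pvScanA_succ, hprobe, hdrop, htake, List.take_succ_cons, List.findIdx_cons]
      by_cases hvt : times[j] < t
      · rw [if_pos ⟨hjd, hvt⟩]
        have hsafe' : dlen1 ≤ times.length ∨ ∃ x ∈ times.drop (j + 1), t ≤ x := by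
          rcases hsafe with h | ⟨x, hx, htx⟩
          · exact Or.inl h
          · refine Or.inr ⟨x, ?_, htx⟩
            rw [hdrop] at hx
            rcases List.mem_cons.mp hx with rfl | hx
            · omega
            · exact hx
        rw [ih (j + 1) (by omega) hsafe']
        have : ¬ t ≤ times[j] := by omega
        simp only [this, decide_false, cond_false]
        omega
      · have : ¬ (j < dlen1 ∧ times[j] < t) := by tauto
        rw [if_neg this]
        have : t ≤ times[j] := by omega
        simp [this]
    · have hc : ¬ (j < dlen1 ∧ ((PySem.List.pyGet? times ((j : Nat) : Int)).getD 0) < t) := by tauto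
      rw [pvScanA_succ, if_neg hc]
      have : dlen1 - j = 0 := by omega
      simp [this]

-- find? on a zip in terms of findIdx on the first component
theorem pvZip_find (P D : List Int) (h : P.length ≤ D.length) (t : Int) :
    (P.zip D).find? (fun p => decide (t ≤ p.1)) =
      if hj : P.findIdx (fun x => decide (t ≤ x)) < P.length then
        some (P[P.findIdx (fun x => decide (t ≤ x))],
              D[P.findIdx (fun x => decide (t ≤ x))]'(by omega))
      else none := by
  induction P generalizing D with
  | nil => simp
  | cons v P' ih =>
    cases D with
    | nil => simp at h
    | cons d D' =>
      have h' : P'.length ≤ D'.length := by simpa using h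
      rw [List.zip_cons_cons, List.find?_cons]
      by_cases htv : t ≤ v
      · have h0 : (v :: P').findIdx (fun x => decide (t ≤ x)) = 0 := by
          simp [List.findIdx_cons, htv]
        simp [htv, h0]
      · have hstep : (v :: P').findIdx (fun x => decide (t ≤ x)) =
            P'.findIdx (fun x => decide (t ≤ x)) + 1 := by
          simp [List.findIdx_cons, htv]
        rw [ih D' h']
        simp only [htv, decide_false, hstep]
        by_cases hlt : P'.findIdx (fun x => decide (t ≤ x)) < P'.length
        · rw [dif_pos hlt, dif_pos (by simpa using Nat.succ_lt_succ hlt)]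
          simp
        · rw [dif_neg hlt, dif_neg (by simpa using fun hc => hlt (Nat.lt_of_succ_lt_succ hc))]

theorem pvFind?_of_findIdx_lt {α : Type} (S : List α) (p : α → Bool) (h : S.findIdx p < S.length) :
    S.find? p = some (S[S.findIdx p]) := by
  induction S with
  | nil => simp at h
  | cons a l ih =>
    by_cases hp : p a
    · simp [List.findIdx_cons, hp]
    · have hstep : (a :: l).findIdx p = l.findIdx p + 1 := by simp [List.findIdx_cons, hp]
      have h' : l.findIdx p < l.length := by rw [hstep] at h; simpa using h
      rw [List.find?_cons]
      simp only [hp, hstep]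
      rw [ih h']
      simp

-- per-query agreement of the two appended values
theorem pvQuery_eq (times data : List Int) (hd : data ≠ [])
    (t : Int) (hsafe : data.length ≤ times.length + 1 ∨ ∃ x ∈ times, t ≤ x) :
    (PySem.List.pyGet? data ((pvScanA times (data.length - 1) t (data.length - 1) 0 : Nat) : Int)).getD 0 =
      (let m : Int := (data.length : Int) - 1
       let st := ((PySem.List.slice times none (some m)).zip data).foldl pvStep ([], [])
       let lo := pvBisect st.1 t st.1.length 0 st.1.length
       if lo < st.1.length then (PySem.List.pyGet? st.2 (lo : Int)).getD 0
       else (PySem.List.pyGet? data m).getD 0) := by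
  have hdl : 0 < data.length := List.length_pos_iff.mpr hd
  have hm : ((data.length : Int) - 1) = ((data.length - 1 : Nat) : Int) := by
    rw [Nat.cast_sub (by omega : 1 ≤ data.length)]; simp
  have hslice : PySem.List.slice times none (some ((data.length : Int) - 1)) =
      times.take (data.length - 1) := by
    rw [hm, PySem.List.slice_to_natCast]
  have hPle : (times.take (data.length - 1)).length ≤ data.length := by
    simp only [List.length_take]; omega
  have hfold : (((times.take (data.length - 1)).zip data).foldl pvStep ([], [])) =
      ((pvStair ((times.take (data.length - 1)).zip data) none).map Prod.fst,
       (pvStair ((times.take (data.length - 1)).zip data) none).map Prod.snd) := by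
    simpa using pvFold_eq_stair ((times.take (data.length - 1)).zip data) [] []
  have hscan : pvScanA times (data.length - 1) t (data.length - 1) 0 =
      (times.take (data.length - 1)).findIdx (fun x => decide (t ≤ x)) := by
    rw [pvScanA_eq times (data.length - 1) t (data.length - 1) 0 (by omega)
      (by rcases hsafe with h | h
          · left; omega
          · right; simpa using h)]
    simp
  have hchain : ((pvStair ((times.take (data.length - 1)).zip data) none).map Prod.fst).Pairwise (· ≤ ·) :=
    ((pvStair_chain ((times.take (data.length - 1)).zip data) none).1).imp (fun h => le_of_lt h)
  have hbis : pvBisect ((pvStair ((times.take (data.length - 1)).zip data) none).map Prod.fst) t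
      ((pvStair ((times.take (data.length - 1)).zip data) none).map Prod.fst).length 0
      ((pvStair ((times.take (data.length - 1)).zip data) none).map Prod.fst).length
      = (pvStair ((times.take (data.length - 1)).zip data) none).findIdx
          (fun p => decide (t ≤ p.1)) := by
    rw [pvBisect_eq_findIdx _ t hchain, List.findIdx_map]
    rfl
  have hSfind : (pvStair ((times.take (data.length - 1)).zip data) none).find?
        (fun p => decide (t ≤ p.1)) =
      ((times.take (data.length - 1)).zip data).find? (fun p => decide (t ≤ p.1)) :=
    pvStair_find _ none t (by intro w h; cases h)
  have hzip := pvZip_find (times.take (data.length - 1)) data hPle t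
  simp only [hslice, hfold, hscan, hbis]
  set P := times.take (data.length - 1) with hPdef
  set S := pvStair (P.zip data) none with hSdef
  set j := P.findIdx (fun x => decide (t ≤ x)) with hjdef
  by_cases hfound : j < P.length
  · rw [dif_pos hfound] at hzip
    have hjd : j < data.length := lt_of_lt_of_le hfound hPle
    have hSfound : S.find? (fun p => decide (t ≤ p.1)) = some (P[j], data[j]) := hSfind.trans hzip
    have hmem := List.mem_of_find?_eq_some hSfound
    have hp := List.find?_some hSfound
    have hlt : S.findIdx (fun p => decide (t ≤ p.1)) < S.length :=
      List.findIdx_lt_length.mpr ⟨_, hmem, hp⟩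
    have hget : S[S.findIdx (fun p => decide (t ≤ p.1))]'hlt = (P[j], data[j]) := by
      have h2 := pvFind?_of_findIdx_lt S (fun p => decide (t ≤ p.1)) hlt
      rw [hSfound] at h2
      exact Option.some_inj.mp h2.symm
    rw [if_pos (by simpa using hlt)]
    rw [PySem.List.pyGet?_natCast, PySem.List.pyGet?_natCast,
        List.getElem?_eq_getElem hjd, List.getElem?_eq_getElem (by simpa using hlt)]
    simp only [Option.getD_some, List.getElem_map]
    rw [hget]
  · rw [dif_neg hfound] at hzip
    have hSnone : S.find? (fun p => decide (t ≤ p.1)) = none := hSfind.trans hzip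
    have hIdxlen : S.findIdx (fun p => decide (t ≤ p.1)) = S.length :=
      List.findIdx_eq_length.mpr (by
        intro x hx
        have := List.find?_eq_none.mp hSnone x hx
        simpa using this)
    rw [if_neg (by simp [hIdxlen])]
    have hjlen : j = P.length := by
      have := List.findIdx_le_length (p := fun x => decide (t ≤ x)) (xs := P)
      omega
    have hPlen : P.length = data.length - 1 := by
      have hdt : data.length - 1 ≤ times.length := by
        by_contra hc
        have hc' : times.length < data.length - 1 := by omega
        have hPt : P = times := by rw [hPdef]; exact List.take_of_length_le (by omega)
        rcases hsafe with h | ⟨x, hx, htx⟩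
        · omega
        · exact hfound (List.findIdx_lt_length.mpr ⟨x, by rw [hPt]; exact hx, by simp [htx]⟩)
      rw [hPdef]; simp [List.length_take]; omega
    rw [hjlen, hPlen, hm, PySem.List.pyGet?_natCast]

-- ===== VERDICT (by name: the statement is the Claim_ definition above) =====
theorem downsample_to_given_times_spec : Claim_equal_downsample_to_given_times := by
  intro times data new_times _hdom hpre
  unfold Spec_downsample_to_given_times
  obtain ⟨h1, h2⟩ := hpre
  cases hnt : new_times with
  | nil => rfl
  | cons t0 rest =>
    have hd : data ≠ [] := by
      rcases h1 with h | h
      · exact h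
      · rw [hnt] at h; cases h
    unfold downsample_to_given_times downsample_to_given_times_alt
    rw [← hnt]
    apply PySem.List.foldl_congr_mem
    intro acc x hx
    have hsafe : data.length ≤ times.length + 1 ∨ ∃ y ∈ times, x ≤ y := by
      rcases h2 with h | h
      · exact Or.inl h
      · exact Or.inr (h x hx)
    exact congrArg (fun z => acc ++ [z]) (pvQuery_eq times data hd x hsafe)
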